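-- pv_equiv track=rewrite | github.com/skojaku/applied-soft-comp | tmp/rocket_game.py | draw_rocket
-- ===== SOURCE A (Python) =====
-- def draw_rocket(vertical_position):
--     """Draw the rocket at a given vertical position."""
--     rocket = """
--        /\\
--       /  \\
--      |    |
--      | 🚀 |
--      |    |
--     /|    |\\
--    / |____| \\
--   💨💨💨💨💨
-- """
--     lines = rocket.strip().split('\n')
--     rocket_height = len(lines)
--
--     # Fixed screen height for rocket display area (needs to fit max position + rocket height)
--     screen_height = 40
--
--     # Calculate how many blank lines above rocket (starts at bottom, moves up)
--     blank_lines_above = max(0, screen_height - vertical_position - rocket_height)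
--
--     # Build the screen with fixed height
--     screen = []
--
--     # Add blank lines above
--     screen.extend([' ' * 40 for _ in range(blank_lines_above)])
--
--     # Add rocket
--     screen.extend([' ' * 15 + line for line in lines])
--
--     # Add blank lines below to maintain fixed height
--     blank_lines_below = screen_height - len(screen)
--     if blank_lines_below > 0:
--         screen.extend([' ' * 40 for _ in range(blank_lines_below)])
--
--     return '\n'.join(screen[:screen_height])
-- ===== SOURCE B (Python) =====
-- def draw_rocket(vertical_position):
--     """Draw the rocket at a given vertical position."""
--     rocket = """
--        /\\
--       /  \\
--      |    |
--      | 🚀 |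
--      |    |
--     /|    |\\
--    / |____| \\
--   💨💨💨💨💨
-- """
--     lines = rocket.strip().split('\n')
--     top = max(0, 40 - vertical_position - len(lines))
--     # Start from an all-blank canvas and paint the sprite onto it,
--     # clipping rows that fall below the bottom of the screen.
--     canvas = [' ' * 40] * 40
--     for offset, line in enumerate(lines):
--         row = top + offset
--         if row < 40:
--             canvas[row] = ' ' * 15 + line
--     return '\n'.join(canvas)
-- ===== Notes on version B (the rewrite author's own statement) =====
-- stated objective: alternative
-- what changed: A assembles the screen by concatenating three separately computed segments (blank lines above, rocket lines, blank padding below) and slicing to 40 rows; B starts from a fixed all-blank 40-row canvas and paints the sprite onto it by in-place row assignment with bottom clipping, so no variable-length segments or slice are ever built.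
import Mathlib
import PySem

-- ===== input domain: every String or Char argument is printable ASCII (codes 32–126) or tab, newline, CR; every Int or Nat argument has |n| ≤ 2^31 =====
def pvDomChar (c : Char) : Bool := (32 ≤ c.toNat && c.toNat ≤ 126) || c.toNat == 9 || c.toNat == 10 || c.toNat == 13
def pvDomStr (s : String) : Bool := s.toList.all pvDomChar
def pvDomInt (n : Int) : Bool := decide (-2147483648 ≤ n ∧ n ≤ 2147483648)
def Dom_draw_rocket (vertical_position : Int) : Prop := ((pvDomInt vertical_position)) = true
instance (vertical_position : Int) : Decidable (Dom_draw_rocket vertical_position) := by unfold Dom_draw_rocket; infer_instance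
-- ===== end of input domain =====

-- B replaces A's three-segment concatenate-and-slice screen construction with a fixed
-- all-blank 40-row canvas onto which the sprite rows are painted by in-place assignment
-- with bottom clipping (objective: alternative construction; same return value).

set_option maxRecDepth 100000

-- ===== PORT A =====
-- s.split('\n') is ported as PySem.Str.split?, exact here because the separator "\n" is nonempty.
def draw_rocket (vertical_position : Int) : String :=
  let rocket : String := "\n       /\\\n      /  \\\n     |    |\n     | 🚀 |\n     |    |\n    /|    |\\\n   / |____| \\\n  💨💨💨💨💨\n"
  let lines : List String := (PySem.Str.split? (PySem.Str.strip rocket) "\n").getD []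
  let rocket_height : Int := lines.length
  let screen_height : Int := 40
  let blank_lines_above : Int := max 0 (screen_height - vertical_position - rocket_height)
  let screen : List String := []
  let screen := screen ++ (PySem.List.pyRange 0 blank_lines_above 1).map (fun _ => String.ofList (List.replicate 40 ' '))
  let screen := screen ++ lines.map (fun line => String.ofList (List.replicate 15 ' ' ++ line.toList))
  let blank_lines_below : Int := screen_height - (screen.length : Int)
  let screen := if blank_lines_below > 0 then screen ++ (PySem.List.pyRange 0 blank_lines_below 1).map (fun _ => String.ofList (List.replicate 40 ' ')) else screen
  PySem.Str.join "\n" (PySem.List.slice screen none (some screen_height))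

-- ===== PORT B =====
-- canvas[row] = … is ported as PySem.List.pySetD; the guard row < 40 together with
-- row = top + offset ≥ 0 keeps the assignment in range, exactly as in Python.
def draw_rocket_alt (vertical_position : Int) : String :=
  let rocket : String := "\n       /\\\n      /  \\\n     |    |\n     | 🚀 |\n     |    |\n    /|    |\\\n   / |____| \\\n  💨💨💨💨💨\n"
  let lines : List String := (PySem.Str.split? (PySem.Str.strip rocket) "\n").getD []
  let top : Int := max 0 (40 - vertical_position - (lines.length : Int))
  let canvas : List String := List.replicate 40 (String.ofList (List.replicate 40 ' '))
  let canvas := (PySem.List.enumerate lines 0).foldl (fun cv p =>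
      let row : Int := top + p.1
      if row < 40 then PySem.List.pySetD cv row (String.ofList (List.replicate 15 ' ' ++ p.2.toList)) else cv) canvas
  PySem.Str.join "\n" canvas

-- ===== PRECONDITION & SPEC =====
def Spec_draw_rocket (vertical_position : Int) (out : String) : Prop := out = draw_rocket_alt vertical_position
instance (vertical_position : Int) (out : String) : Decidable (Spec_draw_rocket vertical_position out) := by unfold Spec_draw_rocket; infer_instance

-- ===== CLAIM (what is proved, stated in full; the proofs are below) =====
def Claim_equal_draw_rocket : Prop := ∀ (vertical_position : Int), Dom_draw_rocket vertical_position → Spec_draw_rocket vertical_position (draw_rocket vertical_position)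

-- ===== LEMMAS AND PROOFS =====

def pvLines : List String :=
  (PySem.Str.split? (PySem.Str.strip "\n       /\\\n      /  \\\n     |    |\n     | 🚀 |\n     |    |\n    /|    |\\\n   / |____| \\\n  💨💨💨💨💨\n") "\n").getD []

def pvBlankRow : String := String.ofList (List.replicate 40 ' ')

def pvRock : List String := pvLines.map (fun line => String.ofList (List.replicate 15 ' ' ++ line.toList))

-- A's body with the number of blank lines above the rocket abstracted as `b`
def pvCoreA (b : Int) : String :=
  PySem.Str.join "\n" (PySem.List.slice
    (if 40 - (((PySem.List.pyRange 0 b 1).map (fun _ => pvBlankRow) ++ pvRock).length : Int) > 0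
     then ((PySem.List.pyRange 0 b 1).map (fun _ => pvBlankRow) ++ pvRock) ++ (PySem.List.pyRange 0 (40 - (((PySem.List.pyRange 0 b 1).map (fun _ => pvBlankRow) ++ pvRock).length : Int)) 1).map (fun _ => pvBlankRow)
     else (PySem.List.pyRange 0 b 1).map (fun _ => pvBlankRow) ++ pvRock)
    none (some 40))

-- an index-characterised middle form used only by the proofs
def pvCoreB (b : Int) : String :=
  PySem.Str.join "\n" ((PySem.List.pyRange 0 40 1).map (fun i =>
    if b ≤ i ∧ i < b + (pvLines.length : Int) then
      String.ofList (List.replicate 15 ' ' ++ (PySem.List.pyGetD pvLines (i - b) "").toList)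
    else pvBlankRow))

-- B's body with the number of blank lines above the rocket abstracted as `b`
def pvCoreB2 (b : Int) : String :=
  PySem.Str.join "\n" ((PySem.List.enumerate pvLines 0).foldl (fun cv p =>
      if b + p.1 < 40 then PySem.List.pySetD cv (b + p.1) (String.ofList (List.replicate 15 ' ' ++ p.2.toList)) else cv)
    (List.replicate 40 pvBlankRow))

lemma draw_rocket_core (vp : Int) :
    draw_rocket vp = pvCoreA (max 0 (40 - vp - (pvLines.length : Int))) := rfl

lemma draw_rocket_alt_core (vp : Int) :
    draw_rocket_alt vp = pvCoreB2 (max 0 (40 - vp - (pvLines.length : Int))) := rfl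

lemma pvLines_len : pvLines.length = 8 := by rfl

lemma pvRock_len : pvRock.length = 8 := by rw [pvRock, List.length_map, pvLines_len]

lemma pvMapConst {α : Type} (b : Int) (x : α) :
    (PySem.List.pyRange 0 b 1).map (fun _ => x) = List.replicate b.toNat x := by
  simp [PySem.List.pyRange_one, Function.comp_def, List.map_const']

lemma pvRock_getElem (j : Nat) (h : j < pvRock.length) :
    pvRock[j] = String.ofList (List.replicate 15 ' ' ++
      (pvLines[j]'(by rw [pvRock_len] at h; rw [pvLines_len]; omega)).toList) := by
  simp [pvRock]

lemma pvB_row (b : Int) (k : Nat) (hk : k < 40) :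
    ((PySem.List.pyRange 0 40 1).map (fun i =>
      if b ≤ i ∧ i < b + (pvLines.length : Int) then
        String.ofList (List.replicate 15 ' ' ++ (PySem.List.pyGetD pvLines (i - b) "").toList)
      else pvBlankRow))[k]'(by rw [List.length_map, PySem.List.length_pyRange_one]; omega) =
    (if b ≤ (k:Int) ∧ (k:Int) < b + 8 then
        String.ofList (List.replicate 15 ' ' ++ (PySem.List.pyGetD pvLines ((k:Int) - b) "").toList)
      else pvBlankRow) := by
  rw [List.getElem_map, PySem.List.getElem_pyRange_one, pvLines_len]
  norm_num

-- painting preserves the canvas length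
lemma pvPaint_length (b : Int) (es : List (Int × String)) (cv : List String) :
    (es.foldl (fun cv p =>
      if b + p.1 < 40 then PySem.List.pySetD cv (b + p.1) (String.ofList (List.replicate 15 ' ' ++ p.2.toList)) else cv) cv).length = cv.length := by
  induction es generalizing cv with
  | nil => rfl
  | cons e es ih =>
      rw [List.foldl_cons, ih]
      by_cases h : b + e.1 < 40
      · rw [if_pos h, PySem.List.length_pySetD]
      · rw [if_neg h]

-- characterisation of the painted canvas at index k
lemma pvPaint_getD (b : Int) (ls : List String) (s : Int) (cv : List String)
    (hbs : 0 ≤ b + s) (hcv : cv.length = 40) (k : Nat) (hk : k < 40) :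
    ((PySem.List.enumerate ls s).foldl (fun cv p =>
      if b + p.1 < 40 then PySem.List.pySetD cv (b + p.1) (String.ofList (List.replicate 15 ' ' ++ p.2.toList)) else cv) cv).getD k "" =
    (if b + s ≤ (k:Int) ∧ (k:Int) < b + s + ls.length then
        String.ofList (List.replicate 15 ' ' ++ (ls.getD ((k:Int) - (b + s)).toNat "").toList)
      else cv.getD k "") := by
  induction ls generalizing s cv with
  | nil =>
      rw [PySem.List.enumerate_nil, List.foldl_nil,
        if_neg (by simp only [List.length_nil]; push_cast; omega)]
  | cons l ls ih =>
      rw [PySem.List.enumerate_cons, List.foldl_cons]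
      set cv' : List String :=
        (if b + s < 40 then PySem.List.pySetD cv (b + s) (String.ofList (List.replicate 15 ' ' ++ l.toList)) else cv) with hcv'
      have hcv'len : cv'.length = 40 := by
        rw [hcv']; by_cases h : b + s < 40
        · rw [if_pos h, PySem.List.length_pySetD, hcv]
        · rw [if_neg h, hcv]
      rw [ih (s + 1) cv' (by omega) hcv'len]
      by_cases h1 : b + (s + 1) ≤ (k:Int) ∧ (k:Int) < b + (s + 1) + ls.length
      · rw [if_pos h1, if_pos (by simp only [List.length_cons] at h1 ⊢; push_cast at h1 ⊢; omega)]
        have hm : ((k:Int) - (b + s)).toNat = ((k:Int) - (b + (s + 1))).toNat + 1 := by omega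
        rw [hm, List.getD_cons_succ]
      · by_cases h2 : (k:Int) = b + s
        · rw [if_neg h1, if_pos (by simp only [List.length_cons]; push_cast; omega)]
          have h0 : ((k:Int) - (b + s)).toNat = 0 := by omega
          rw [h0, List.getD_cons_zero, hcv']
          rw [if_pos (by omega)]
          rw [PySem.List.pySetD_of_nonneg]
          have hkn : (b + s).toNat = k := by omega
          rw [hkn, List.getD_eq_getElem _ _ (by rw [List.length_set, hcv]; omega),
            List.getElem_set_self]
          exact hbs
        · rw [if_neg h1, if_neg (by simp only [List.length_cons] at h1 ⊢; push_cast at h1 ⊢; omega)]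
          rw [hcv']
          by_cases h3 : b + s < 40
          · rw [if_pos h3, PySem.List.pySetD_of_nonneg,
              List.getD_eq_getElem _ _ (by rw [List.length_set, hcv]; omega),
              List.getD_eq_getElem _ _ (by rw [hcv]; omega),
              List.getElem_set_ne (by omega)]
            exact hbs
          · rw [if_neg h3]

-- B's painted canvas equals the index-characterised middle form
lemma pvCoreB2_eq (b : Int) (hb : 0 ≤ b) : pvCoreB2 b = pvCoreB b := by
  unfold pvCoreB2 pvCoreB
  apply congrArg (PySem.Str.join "\n")
  apply List.ext_getElem
  · rw [pvPaint_length, List.length_replicate, List.length_map, PySem.List.length_pyRange_one]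
    decide
  · intro k hk hk'
    have hk40 : k < 40 := by rw [pvPaint_length, List.length_replicate] at hk; omega
    rw [pvB_row b k hk40]
    rw [← List.getD_eq_getElem _ "" hk]
    rw [pvPaint_getD b pvLines 0
      (List.replicate 40 pvBlankRow) (by omega) (by rw [List.length_replicate]) k hk40]
    rw [pvLines_len]
    by_cases h : b + 0 ≤ (k:Int) ∧ (k:Int) < b + 0 + (8:Nat)
    · rw [if_pos h, if_pos (by push_cast at h; omega)]
      rw [PySem.List.pyGetD_eq_getElem pvLines "" (by omega) (by rw [pvLines_len]; push_cast at h; omega)]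
      rw [List.getD_eq_getElem _ "" (by rw [pvLines_len]; push_cast at h; omega)]
      norm_num
    · rw [if_neg h, if_neg (by push_cast at h; omega)]
      rw [List.getD_eq_getElem _ "" (by rw [List.length_replicate]; omega), List.getElem_replicate]

lemma pvCore_eq (n : Nat) (hn : n ≤ 40) : pvCoreA (n:Int) = pvCoreB (n:Int) := by
  unfold pvCoreA pvCoreB
  apply congrArg (PySem.Str.join "\n")
  rw [pvMapConst, Int.toNat_natCast]
  have hlen1 : (List.replicate n pvBlankRow ++ pvRock).length = n + 8 := by
    simp [pvRock_len]
  have hlen : ((List.replicate n pvBlankRow ++ pvRock).length : Int) = (n:Int) + 8 := by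
    rw [hlen1]; push_cast; ring
  rw [hlen]
  by_cases hcase : n < 32
  · rw [if_pos (by omega), pvMapConst,
      show ((40:Int) - ((n:Int) + 8)).toNat = 32 - n from by omega,
      PySem.List.slice_to _ (by omega),
      show ((40:Int)).toNat = 40 from rfl,
      List.take_of_length_le (by simp [pvRock_len]; omega)]
    apply List.ext_getElem
    · rw [List.length_map, PySem.List.length_pyRange_one]
      simp [pvRock_len]; omega
    · intro k hk hk'
      have hk40 : k < 40 := by simp [pvRock_len] at hk; omega
      rw [pvB_row _ k hk40]
      rw [List.getElem_append]
      by_cases h2 : k < n + 8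
      · rw [dif_pos (by rw [hlen1]; omega), List.getElem_append]
        by_cases h1 : k < n
        · rw [dif_pos (by rw [List.length_replicate]; omega), List.getElem_replicate,
            if_neg (by omega)]
        · rw [dif_neg (by rw [List.length_replicate]; omega), if_pos (by omega)]
          simp only [List.length_replicate]
          rw [pvRock_getElem (k - n) (by rw [pvRock_len]; omega)]
          rw [PySem.List.pyGetD_eq_getElem pvLines "" (by omega)
            (by rw [pvLines_len]; omega)]
          have hidx : ((k:Int) - (n:Int)).toNat = k - n := by omega
          simp only [hidx]
      · rw [dif_neg (by rw [hlen1]; omega), List.getElem_replicate,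
          if_neg (by omega)]
  · rw [if_neg (by omega), PySem.List.slice_to _ (by omega),
      show ((40:Int)).toNat = 40 from rfl]
    apply List.ext_getElem
    · rw [List.length_take, List.length_map, PySem.List.length_pyRange_one, hlen1]
      omega
    · intro k hk hk'
      have hk40 : k < 40 := by rw [List.length_take] at hk; omega
      rw [pvB_row _ k hk40, List.getElem_take, List.getElem_append]
      by_cases h1 : k < n
      · rw [dif_pos (by rw [List.length_replicate]; omega), List.getElem_replicate,
          if_neg (by omega)]
      · rw [dif_neg (by rw [List.length_replicate]; omega), if_pos (by omega)]
        simp only [List.length_replicate]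
        rw [pvRock_getElem (k - n) (by rw [pvRock_len]; omega)]
        rw [PySem.List.pyGetD_eq_getElem pvLines "" (by omega)
          (by rw [pvLines_len]; omega)]
        have hidx : ((k:Int) - (n:Int)).toNat = k - n := by omega
        simp only [hidx]

lemma pvCore_big (b : Int) (hb : 40 ≤ b) : pvCoreA b = pvCoreB b := by
  unfold pvCoreA pvCoreB
  apply congrArg (PySem.Str.join "\n")
  rw [pvMapConst]
  have hlen : ((List.replicate b.toNat pvBlankRow ++ pvRock).length : Int) = (b.toNat : Int) + 8 := by
    simp [pvRock_len]
  rw [hlen, if_neg (by omega), PySem.List.slice_to _ (by omega),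
    show ((40:Int)).toNat = 40 from rfl,
    List.take_append_of_le_length (by rw [List.length_replicate]; omega), List.take_replicate,
    show min 40 b.toNat = 40 from by omega]
  have hall : ∀ i ∈ PySem.List.pyRange 0 40 1,
      (if b ≤ i ∧ i < b + (pvLines.length : Int) then
        String.ofList (List.replicate 15 ' ' ++ (PySem.List.pyGetD pvLines (i - b) "").toList)
      else pvBlankRow) = pvBlankRow := by
    intro i hi
    rw [PySem.List.mem_pyRange_one] at hi
    rw [if_neg (by omega)]
  rw [List.map_congr_left hall, pvMapConst]
  simp

-- ===== VERDICT (by name: the statement is the Claim_ definition above) =====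
theorem draw_rocket_spec : Claim_equal_draw_rocket := by
  intro vp _
  show draw_rocket vp = draw_rocket_alt vp
  rw [draw_rocket_core, draw_rocket_alt_core]
  generalize hb : max 0 (40 - vp - (pvLines.length : Int)) = b
  have hb0 : 0 ≤ b := hb ▸ le_max_left _ _
  rw [pvCoreB2_eq b hb0]
  by_cases h : b ≤ 40
  · have hbn : b = ((b.toNat : Nat) : Int) := (Int.toNat_of_nonneg hb0).symm
    rw [hbn]
    exact pvCore_eq b.toNat (by omega)
  · exact pvCore_big b (by omega)
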